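-- pv_equiv track=rewrite | github.com/weizhang25/OpenJudge | cookbooks/multi_turn_dialogue/multi_turn_evaluation.py | split_session_to_steps
-- ===== SOURCE A (Python) =====
-- from typing import Dict, List, Tuple
--
-- def split_session_to_steps(messages: List[Dict[str, str]]) -> List[Tuple[List[Dict[str, str]], str]]:
--     """
--     Split a multi-turn session into step-level evaluations.
--
--     Each step = (history before this response, current assistant response)
--
--     Args:
--         messages: Complete conversation session
--
--     Returns:
--         List of (history, response) tuples for each assistant turn
--     """
--     steps = []
--     history = []
--
--     for msg in messages:
--         if msg["role"] == "assistant":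
--             # This is a step to evaluate
--             steps.append((list(history), msg["content"]))
--         history.append(msg)
--
--     return steps
-- ===== SOURCE B (Python) =====
-- from typing import Dict, List, Tuple
--
-- def split_session_to_steps(messages: List[Dict[str, str]]) -> List[Tuple[List[Dict[str, str]], str]]:
--     """Each assistant turn at index i yields (messages[:i], its content): one comprehension, no running accumulator."""
--     return [(messages[:i], msg["content"])
--             for i, msg in enumerate(messages)
--             if msg["role"] == "assistant"]
-- ===== Notes on version B (the rewrite author's own statement) =====
-- stated objective: simpler
-- what changed: Replaced the loop that maintains a running history list and an output accumulator by a single comprehension over enumerate(messages) that filters assistant turns and obtains each history directly as the prefix slice messages[:i].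
import Mathlib
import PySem

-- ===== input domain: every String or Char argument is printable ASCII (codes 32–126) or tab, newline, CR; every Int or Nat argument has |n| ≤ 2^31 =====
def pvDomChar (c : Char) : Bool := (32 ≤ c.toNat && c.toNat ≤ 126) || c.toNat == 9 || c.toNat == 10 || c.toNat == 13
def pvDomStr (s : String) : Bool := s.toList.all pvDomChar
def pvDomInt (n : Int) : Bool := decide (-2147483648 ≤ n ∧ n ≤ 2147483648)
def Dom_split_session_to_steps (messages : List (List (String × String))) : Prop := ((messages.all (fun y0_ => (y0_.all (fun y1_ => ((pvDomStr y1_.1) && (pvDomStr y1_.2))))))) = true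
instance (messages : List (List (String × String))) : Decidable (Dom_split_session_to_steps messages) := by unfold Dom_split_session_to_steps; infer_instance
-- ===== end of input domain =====

-- B replaces the running-history accumulator loop by one comprehension over enumerate with prefix slices (objective: simpler).

-- shared dict-lookup helper: msg[k] = first match in the association list
def pvLookup (d : List (String × String)) (k : String) : Option String :=
  (d.find? (fun p => p.1 == k)).map (·.2)

-- ===== PORT A =====
-- loop over messages keeping (steps, history); append (copy of history, content) at each assistant turn
def split_session_to_steps (messages : List (List (String × String))) : List ((List (List (String × String))) × String) :=
  (messages.foldl
    (fun (st : List ((List (List (String × String))) × String) × List (List (String × String))) msg =>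
      let steps := if pvLookup msg "role" == some "assistant"
                   then st.1 ++ [(st.2, (pvLookup msg "content").getD "")]
                   else st.1
      (steps, st.2 ++ [msg]))
    ([], [])).1

-- ===== PORT B =====
-- comprehension: enumerate, filter assistant turns, map to (messages[:i], content)
def split_session_to_steps_alt (messages : List (List (String × String))) : List ((List (List (String × String))) × String) :=
  ((PySem.List.enumerate messages 0).filter
      (fun q => pvLookup q.2 "role" == some "assistant")).map
    (fun q => (PySem.List.slice messages none (some q.1), (pvLookup q.2 "content").getD ""))

-- ===== PRECONDITION & SPEC =====
-- Pre_ excludes exactly the inputs where Python raises KeyError: a message without a "role" key,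
-- or an assistant message without a "content" key.
def Pre_split_session_to_steps (messages : List (List (String × String))) : Prop :=
  ∀ msg ∈ messages, (pvLookup msg "role").isSome = true ∧
    (pvLookup msg "role" = some "assistant" → (pvLookup msg "content").isSome = true)
instance (messages : List (List (String × String))) : Decidable (Pre_split_session_to_steps messages) := by unfold Pre_split_session_to_steps; infer_instance
def pvWitness_split_session_to_steps : (List (List (String × String))) :=
  [[("role", "user"), ("content", "hi")], [("role", "assistant"), ("content", "hello")]]

def Spec_split_session_to_steps (messages : List (List (String × String))) (out : List ((List (List (String × String))) × String)) : Prop := out = split_session_to_steps_alt messages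
instance (messages : List (List (String × String))) (out : List ((List (List (String × String))) × String)) : Decidable (Spec_split_session_to_steps messages out) := by unfold Spec_split_session_to_steps; infer_instance

-- ===== CLAIM (what is proved, stated in full; the proofs are below) =====
def Claim_equal_split_session_to_steps : Prop := ∀ (messages : List (List (String × String))), Dom_split_session_to_steps messages → Pre_split_session_to_steps messages → Spec_split_session_to_steps messages (split_session_to_steps messages)

-- ===== LEMMAS AND PROOFS =====

-- loop invariant for A's fold, stated against B's enumerate/filter/map shape
theorem pv_fold_key (ms : List (List (String × String))) (s : Nat)
    (steps : List ((List (List (String × String))) × String)) (hist : List (List (String × String))) :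
    (ms.foldl
      (fun (st : List ((List (List (String × String))) × String) × List (List (String × String))) msg =>
        let steps := if pvLookup msg "role" == some "assistant"
                     then st.1 ++ [(st.2, (pvLookup msg "content").getD "")]
                     else st.1
        (steps, st.2 ++ [msg]))
      (steps, hist)).1
    = steps ++ ((PySem.List.enumerate ms (s : Int)).filter
          (fun q => pvLookup q.2 "role" == some "assistant")).map
        (fun q => (hist ++ ms.take (q.1 - (s : Int)).toNat, (pvLookup q.2 "content").getD "")) := by
  induction ms generalizing s steps hist with
  | nil => simp [PySem.List.enumerate]
  | cons m ms ih =>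
    rw [List.foldl_cons, PySem.List.enumerate_cons, List.filter_cons]
    have hs1 : (s : Int) + 1 = ((s + 1 : Nat) : Int) := by push_cast; ring
    rw [hs1]
    have hmap : ((PySem.List.enumerate ms ((s + 1 : Nat) : Int)).filter
          (fun q => pvLookup q.2 "role" == some "assistant")).map
        (fun q => ((hist ++ [m]) ++ ms.take (q.1 - ((s + 1 : Nat) : Int)).toNat, (pvLookup q.2 "content").getD ""))
        = ((PySem.List.enumerate ms ((s + 1 : Nat) : Int)).filter
          (fun q => pvLookup q.2 "role" == some "assistant")).map
        (fun q => (hist ++ (m :: ms).take (q.1 - (s : Int)).toNat, (pvLookup q.2 "content").getD "")) := by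
      apply List.map_congr_left
      intro q hq
      have hq' := List.mem_of_mem_filter hq
      rw [PySem.List.mem_enumerate_iff] at hq'
      obtain ⟨k, hk, rfl⟩ := hq'
      have h1 : (((s + 1 : Nat) : Int) + k - ((s + 1 : Nat) : Int)).toNat = k := by omega
      have h2 : (((s + 1 : Nat) : Int) + k - (s : Int)).toNat = k + 1 := by omega
      have h3 : ((s : Int) + 1 + k).toNat - s = k + 1 := by omega
      simp [h1, h2, h3]
    by_cases h : (pvLookup m "role" == some "assistant") = true
    · rw [if_pos h, if_pos (by simpa using h)]
      rw [ih (s + 1) (steps ++ [(hist, (pvLookup m "content").getD "")]) (hist ++ [m]), hmap]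
      simp
    · rw [if_neg h, if_neg (by simpa using h)]
      rw [ih (s + 1) steps (hist ++ [m]), hmap]

-- ===== VERDICT (by name: the statement is the Claim_ definition above) =====
theorem split_session_to_steps_spec : Claim_equal_split_session_to_steps := by
  intro messages _ _
  unfold Spec_split_session_to_steps split_session_to_steps split_session_to_steps_alt
  have := pv_fold_key messages 0 [] []
  simp only [Nat.cast_zero] at this
  rw [this]
  simp only [List.nil_append]
  apply List.map_congr_left
  intro q hq
  have hq' := List.mem_of_mem_filter hq
  rw [PySem.List.mem_enumerate_iff] at hq'
  obtain ⟨k, hk, rfl⟩ := hq'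
  have : ((0 : Int) + k - (0 : Nat)).toNat = k := by omega
  simp only [this]
  have hz : (0 : Int) + (k : Int) = ((k : Nat) : Int) := by push_cast; ring
  rw [hz, PySem.List.slice_to_natCast]
  simp
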